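-- pv_equiv track=rewrite | github.com/Bchass/tinynumpy | tinynumpy/tinynumpy.py | _strides_for_shape
-- ===== SOURCE A (Python) =====
-- def _strides_for_shape(shape, itemsize, order='C'):
--     strides = [0] * len(shape)
--     if order == 'C':
--         strides[-1] = itemsize
--         for i in range(len(shape) - 2, -1, -1):
--             strides[i] = strides[i + 1] * shape[i + 1]
--     elif order == 'F':
--         strides[0] = itemsize
--         for i in range(1, len(shape)):
--             strides[i] = strides[i - 1] * shape[i - 1]
--     return tuple(strides)
-- ===== SOURCE B (Python) =====
-- def _prod(xs):
--     p = 1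
--     for x in xs:
--         p *= x
--     return p
--
--
-- def _strides_for_shape(shape, itemsize, order='C'):
--     n = len(shape)
--     if order == 'C':
--         return tuple(itemsize * _prod(shape[i + 1:]) for i in range(n))
--     if order == 'F':
--         return tuple(itemsize * _prod(shape[:i]) for i in range(n))
--     return (0,) * n
-- ===== Notes on version B (the rewrite author's own statement) =====
-- stated objective: simpler
-- what changed: Each stride is computed independently as itemsize times the product of a slice of the shape (suffix product for 'C', prefix product for 'F'), replacing A's in-place array mutation with a dependent incremental scan.
import Mathlib
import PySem

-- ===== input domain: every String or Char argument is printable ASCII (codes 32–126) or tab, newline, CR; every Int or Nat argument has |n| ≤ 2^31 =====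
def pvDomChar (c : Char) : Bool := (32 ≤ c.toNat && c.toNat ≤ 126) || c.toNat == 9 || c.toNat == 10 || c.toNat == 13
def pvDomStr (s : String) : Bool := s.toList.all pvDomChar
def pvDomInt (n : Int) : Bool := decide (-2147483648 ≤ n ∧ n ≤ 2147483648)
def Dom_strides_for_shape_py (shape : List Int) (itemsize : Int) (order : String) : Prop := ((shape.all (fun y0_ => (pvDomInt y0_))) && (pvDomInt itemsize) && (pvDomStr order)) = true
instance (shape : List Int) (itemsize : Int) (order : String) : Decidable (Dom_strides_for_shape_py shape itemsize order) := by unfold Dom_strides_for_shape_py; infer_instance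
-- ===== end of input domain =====

-- B computes each stride independently as itemsize * product of a slice of the shape
-- (suffix for 'C', prefix for 'F'), replacing A's in-place incremental mutation: simpler.

-- ===== PORT A =====
def strides_for_shape_py (shape : List Int) (itemsize : Int) (order : String) : List Int :=
  let strides : List Int := List.replicate shape.length 0      -- [0] * len(shape)
  if order == "C" then
    let strides := PySem.List.pySetD strides (-1) itemsize     -- strides[-1] = itemsize
    (PySem.List.pyRange ((shape.length : Int) - 2) (-1) (-1)).foldl
      (fun s i => PySem.List.pySetD s i
        (PySem.List.pyGetD s (i + 1) 0 * PySem.List.pyGetD shape (i + 1) 0)) strides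
  else if order == "F" then
    let strides := PySem.List.pySetD strides 0 itemsize        -- strides[0] = itemsize
    (PySem.List.pyRange 1 ((shape.length : Nat) : Int) 1).foldl
      (fun s i => PySem.List.pySetD s i
        (PySem.List.pyGetD s (i - 1) 0 * PySem.List.pyGetD shape (i - 1) 0)) strides
  else strides

-- ===== PORT B =====
-- _prod: a running product, folded over the list
def pvProd (xs : List Int) : Int := xs.foldl (fun p x => p * x) 1

def strides_for_shape_py_alt (shape : List Int) (itemsize : Int) (order : String) : List Int :=
  if order == "C" then
    (List.range shape.length).map               -- shape[i+1:] with i+1 ≥ 0 is slice (some (i+1)) none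
      (fun (i : Nat) => itemsize * pvProd (PySem.List.slice shape (some ((i : Int) + 1)) none))
  else if order == "F" then
    (List.range shape.length).map               -- shape[:i] with i ≥ 0 is slice none (some i)
      (fun (i : Nat) => itemsize * pvProd (PySem.List.slice shape none (some (i : Int))))
  else
    List.replicate shape.length 0

-- ===== PRECONDITION & SPEC =====
-- Pre_ excludes ONLY the inputs on which A raises IndexError: the empty shape with order 'C' or 'F'.
def Pre_strides_for_shape_py (shape : List Int) (itemsize : Int) (order : String) : Prop :=
  (order = "C" ∨ order = "F") → shape ≠ []
instance (shape : List Int) (itemsize : Int) (order : String) : Decidable (Pre_strides_for_shape_py shape itemsize order) := by unfold Pre_strides_for_shape_py; infer_instance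

def pvWitness_strides_for_shape_py : List Int × Int × String := ([2, 3, 4], 8, "C")

def Spec_strides_for_shape_py (shape : List Int) (itemsize : Int) (order : String) (out : List Int) : Prop := out = strides_for_shape_py_alt shape itemsize order
instance (shape : List Int) (itemsize : Int) (order : String) (out : List Int) : Decidable (Spec_strides_for_shape_py shape itemsize order out) := by unfold Spec_strides_for_shape_py; infer_instance

-- ===== CLAIM (what is proved, stated in full; the proofs are below) =====
def Claim_equal_strides_for_shape_py : Prop := ∀ (shape : List Int) (itemsize : Int) (order : String), Dom_strides_for_shape_py shape itemsize order → Pre_strides_for_shape_py shape itemsize order → Spec_strides_for_shape_py shape itemsize order (strides_for_shape_py shape itemsize order)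

-- ===== LEMMAS AND PROOFS =====

theorem pvProd_eq_prod (xs : List Int) : pvProd xs = xs.prod := by
  rw [pvProd, List.prod_eq_foldl]

theorem getD_set_ne (s : List Int) (k j : Nat) (v : Int) (h : j ≠ k) :
    (s.set k v).getD j 0 = s.getD j 0 := by
  simp [List.getD, Ne.symm h]

theorem getD_set_self (s : List Int) (k : Nat) (v : Int) (h : k < s.length) :
    (s.set k v).getD k 0 = v := by
  simp [List.getD, h]

theorem pySetD_neg_one (xs : List Int) (v : Int) (h : xs ≠ []) :
    PySem.List.pySetD xs (-1) v = xs.set (xs.length - 1) v := by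
  have h1 : 1 ≤ xs.length := List.length_pos_of_ne_nil h
  simp [PySem.List.pySetD, PySem.List.pySet?, PySem.List.pyIdx?, h1]

theorem foldl_set_length (l : List Int) (f : List Int → Int → Int) (s : List Int) :
    (l.foldl (fun s i => PySem.List.pySetD s i (f s i)) s).length = s.length := by
  induction l generalizing s with
  | nil => rfl
  | cons a l ih => simp [List.foldl_cons, ih, PySem.List.length_pySetD]

-- the C loop fills index i (downwards) with itemsize * product of the suffix after i
theorem loopC (shape : List Int) (itemsize : Int) :
  ∀ (k : Nat) (s : List Int), s.length = shape.length → k + 1 < shape.length →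
  (∀ j : Nat, j < shape.length → k < j → s.getD j 0 = itemsize * (shape.drop (j+1)).prod) →
  ∀ j : Nat, j < shape.length →
    ((PySem.List.pyRange (k : Int) (-1) (-1)).foldl
      (fun s i => PySem.List.pySetD s i (PySem.List.pyGetD s (i + 1) 0 * PySem.List.pyGetD shape (i + 1) 0)) s).getD j 0
    = itemsize * (shape.drop (j+1)).prod := by
  intro k
  induction k with
  | zero =>
    intro s hlen hk hinv j hj
    rw [PySem.List.pyRange_neg_one_cons (by omega),
      PySem.List.pyRange_neg_one_eq_nil (by omega)]
    simp only [List.foldl_cons, List.foldl_nil]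
    rw [show (((0:Nat):Int)+1) = ((1:Nat):Int) by omega]
    simp only [PySem.List.pySetD_natCast, PySem.List.pyGetD_natCast]
    rcases Nat.eq_zero_or_pos j with hj0 | hj0
    · subst hj0
      rw [getD_set_self _ _ _ (by omega)]
      rw [hinv 1 (by omega) (by omega)]
      rw [List.drop_eq_getElem_cons (by omega : 1 < shape.length), List.prod_cons,
        List.getD_eq_getElem _ _ (by omega : 1 < shape.length)]
      ring
    · rw [getD_set_ne _ _ _ _ (by omega)]
      exact hinv j hj (by omega)
  | succ k ih =>
    intro s hlen hk hinv j hj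
    rw [PySem.List.pyRange_neg_one_cons (by omega)]
    simp only [List.foldl_cons]
    rw [show (((k+1:Nat)):Int) - 1 = ((k:Nat):Int) by omega]
    rw [show (((k+1:Nat)):Int) + 1 = (((k+2:Nat)):Int) by omega]
    simp only [PySem.List.pySetD_natCast, PySem.List.pyGetD_natCast]
    apply ih
    · simpa using hlen
    · omega
    · intro j' hj' hkj'
      rcases Nat.lt_or_ge (k+1) j' with h1 | h1
      · rw [getD_set_ne _ _ _ _ (by omega)]
        exact hinv j' hj' h1
      · have : j' = k + 1 := by omega
        subst this
        rw [getD_set_self _ _ _ (by omega)]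
        rw [hinv (k+2) (by omega) (by omega)]
        rw [List.drop_eq_getElem_cons (by omega : k+2 < shape.length), List.prod_cons,
          List.getD_eq_getElem _ _ (by omega : k+2 < shape.length)]
        ring
    · exact hj

-- the F loop fills index i (upwards, i = length - g) with itemsize * product of the prefix before i
theorem loopF (shape : List Int) (itemsize : Int) :
  ∀ (g : Nat) (s : List Int), s.length = shape.length → g < shape.length →
  (∀ j : Nat, j < shape.length - g → s.getD j 0 = itemsize * (shape.take j).prod) →
  ∀ j : Nat, j < shape.length →
    ((PySem.List.pyRange ((shape.length - g : Nat) : Int) ((shape.length : Nat) : Int) 1).foldl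
      (fun s i => PySem.List.pySetD s i (PySem.List.pyGetD s (i - 1) 0 * PySem.List.pyGetD shape (i - 1) 0)) s).getD j 0
    = itemsize * (shape.take j).prod := by
  intro g
  induction g with
  | zero =>
    intro s hlen hg hinv j hj
    rw [PySem.List.pyRange_one_eq_nil (by omega)]
    exact hinv j (by omega)
  | succ g ih =>
    intro s hlen hg hinv j hj
    rw [PySem.List.pyRange_one_cons (by omega)]
    simp only [List.foldl_cons]
    rw [show ((shape.length - (g+1) : Nat) : Int) + 1 = ((shape.length - g : Nat) : Int) by omega]
    rw [show ((shape.length - (g+1) : Nat) : Int) - 1 = ((shape.length - (g+1) - 1 : Nat) : Int) by omega]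
    simp only [PySem.List.pySetD_natCast, PySem.List.pyGetD_natCast]
    apply ih
    · simpa using hlen
    · omega
    · intro j' hj'
      rcases Nat.lt_or_ge j' (shape.length - (g+1)) with h1 | h1
      · rw [getD_set_ne _ _ _ _ (by omega)]
        exact hinv j' h1
      · have hje : j' = shape.length - (g+1) := by omega
        subst hje
        rw [getD_set_self _ _ _ (by omega)]
        rw [hinv (shape.length - (g+1) - 1) (by omega)]
        rw [show shape.length - (g+1) = (shape.length - (g+1) - 1) + 1 by omega]
        rw [List.take_add_one, List.getElem?_eq_getElem (by omega), List.prod_append,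
          List.getD_eq_getElem _ _ (by omega)]
        simp [mul_assoc]
    · exact hj

-- ===== VERDICT (by name: the statement is the Claim_ definition above) =====
theorem strides_for_shape_py_spec : Claim_equal_strides_for_shape_py := by
  intro shape itemsize order _hd hpre
  unfold Spec_strides_for_shape_py strides_for_shape_py strides_for_shape_py_alt
  by_cases hC : order = "C"
  · have hne : shape ≠ [] := hpre (Or.inl hC)
    have hn : 1 ≤ shape.length := List.length_pos_of_ne_nil hne
    simp only [hC, beq_self_eq_true, if_true]
    rw [pySetD_neg_one _ _ (by simp [List.replicate_eq_nil_iff]; omega)]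
    simp only [List.length_replicate]
    apply List.ext_getElem
    · rw [foldl_set_length]; simp
    · intro j hj1 hj2
      have hjlen : j < shape.length := by
        simpa [foldl_set_length] using hj1
      have hrhs : ((List.range shape.length).map
          (fun (i : Nat) => itemsize * pvProd (PySem.List.slice shape (some ((i : Int) + 1)) none)))[j] =
          itemsize * (shape.drop (j+1)).prod := by
        simp only [List.getElem_map, List.getElem_range]
        rw [show ((j:Int)+1) = ((j+1:Nat):Int) by omega, PySem.List.slice_from_natCast,
          pvProd_eq_prod]
      rw [hrhs, ← List.getD_eq_getElem _ 0 hj1]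
      rcases Nat.lt_or_ge shape.length 2 with h2 | h2
      · -- length = 1: the range is empty, the fold is the initial state
        rw [PySem.List.pyRange_neg_one_eq_nil (by omega)]
        have hj0 : j = 0 := by omega
        subst hj0
        simp only [List.foldl_nil]
        rw [show shape.length - 1 = 0 by omega, getD_set_self _ _ _ (by simpa using hn)]
        rw [List.drop_eq_nil_of_le (by omega)]
        simp
      · rw [show (shape.length : Int) - 2 = ((shape.length - 2 : Nat) : Int) by omega]
        apply loopC shape itemsize (shape.length - 2)
        · simp
        · omega
        · intro j' hj' hlt
          have hje : j' = shape.length - 1 := by omega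
          subst hje
          rw [getD_set_self _ _ _ (by simpa using hn)]
          rw [List.drop_eq_nil_of_le (by omega)]
          simp
        · exact hjlen
  · by_cases hF : order = "F"
    · have hne : shape ≠ [] := hpre (Or.inr hF)
      have hn : 1 ≤ shape.length := List.length_pos_of_ne_nil hne
      simp only [hF, beq_self_eq_true, if_true, show (("F" : String) == "C") = false by decide,
        Bool.false_eq_true, if_false]
      rw [show (0:Int) = ((0:Nat):Int) by omega]
      simp only [PySem.List.pySetD_natCast]
      apply List.ext_getElem
      · rw [foldl_set_length]; simp
      · intro j hj1 hj2
        have hjlen : j < shape.length := by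
          simpa [foldl_set_length] using hj1
        have hrhs : ((List.range shape.length).map
            (fun (i : Nat) => itemsize * pvProd (PySem.List.slice shape none (some (i : Int)))))[j] =
            itemsize * (shape.take j).prod := by
          simp only [List.getElem_map, List.getElem_range]
          rw [PySem.List.slice_to_natCast, pvProd_eq_prod]
        rw [hrhs, ← List.getD_eq_getElem _ 0 hj1]
        have hmain := loopF shape itemsize (shape.length - 1)
          ((List.replicate shape.length (0:Int)).set 0 itemsize) (by simp) (by omega)
          (fun j' hj' => by
            have hj0 : j' = 0 := by omega
            subst hj0
            rw [getD_set_self _ _ _ (by simpa using hn)]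
            simp) j hjlen
        rw [show ((shape.length - (shape.length - 1) : Nat) : Int) = 1 by omega] at hmain
        exact hmain
    · simp [hC, hF]
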